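-- pv_equiv track=rewrite | github.com/MrBrantCode/unitest_baseline | mut_generate/mist_train_cf/cf_48780/solution.py | five_div_seq
-- ===== SOURCE A (Python) =====
-- def five_div_seq(n: int):
--     count = 0
--     for i in range(n-1, 999, -2):
--         str_i = str(i)
--         if len(set(str_i)) >= 4 and '2' in str_i:
--             if i % 9 == 0 or i % 14 == 0:
--                 count += str_i.count('5')
--     return count
-- ===== SOURCE B (Python) =====
-- def _sweep(hi, m):
--     # sum of the digit-test contributions over the multiples of m in [1000, hi]
--     # that share hi's parity, walking the arithmetic progression top-down
--     par = hi % 2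
--     if m % 2 == 0 and par == 1:
--         return 0
--     i = hi - hi % m
--     if m % 2 == 1 and i % 2 != par:
--         i -= m
--     step = m if m % 2 == 0 else 2 * m
--     total = 0
--     while i >= 1000:
--         s = str(i)
--         if len(set(s)) >= 4 and '2' in s:
--             total += s.count('5')
--         i -= step
--     return total
--
-- def five_div_seq(n: int):
--     hi = n - 1
--     if hi < 1000:
--         return 0
--     # inclusion-exclusion over the divisibility condition: 9 | i or 14 | i
--     return _sweep(hi, 9) + _sweep(hi, 14) - _sweep(hi, 126)
-- ===== Notes on version B (the rewrite author's own statement) =====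
-- stated objective: faster
-- what changed: Instead of scanning every parity-matching integer in the whole range and testing divisibility, B walks only three arithmetic progressions (multiples of 9, of 14, and of 126 with the right parity) top-down and combines their digit-test sums by inclusion-exclusion.
import Mathlib
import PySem

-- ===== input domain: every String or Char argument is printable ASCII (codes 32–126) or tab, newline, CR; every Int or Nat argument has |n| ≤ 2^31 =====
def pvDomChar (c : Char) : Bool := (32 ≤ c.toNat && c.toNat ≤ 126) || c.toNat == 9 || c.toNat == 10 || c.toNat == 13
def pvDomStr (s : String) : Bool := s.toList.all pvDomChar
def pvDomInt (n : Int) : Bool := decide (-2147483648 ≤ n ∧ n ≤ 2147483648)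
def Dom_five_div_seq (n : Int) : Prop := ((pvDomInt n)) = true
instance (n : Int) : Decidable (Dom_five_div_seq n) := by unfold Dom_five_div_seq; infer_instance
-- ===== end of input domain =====

-- B replaces A's scan of every other integer below n by three top-down arithmetic
-- progressions (the multiples of 9, 14 and 126 with the right parity) combined by
-- inclusion-exclusion (objective: faster, by a constant factor).

-- ===== PORT A =====
def five_div_seq (n : Int) : Int :=
  (PySem.List.pyRange (n - 1) 999 (-2)).foldl
    (fun count i =>
      let str_i := PySem.Int.toStr i
      if 4 ≤ (PySem.Set.ofList str_i.toList).length ∧ PySem.Str.isIn "2" str_i = true then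
        if PySem.Int.mod i 9 = 0 ∨ PySem.Int.mod i 14 = 0 then
          count + (PySem.Str.count str_i "5" : Int)
        else count
      else count)
    0

-- ===== PORT B =====
-- the 'while i >= 1000' loop of Source B's _sweep; '0 < step' is a totality guard only
-- (Source B always calls it with step ∈ {18, 14, 252})
def sweepGo (step : Int) (i : Int) (total : Int) : Int :=
  if _h : 1000 ≤ i ∧ 0 < step then
    let s := PySem.Int.toStr i
    let total' :=
      if 4 ≤ (PySem.Set.ofList s.toList).length ∧ PySem.Str.isIn "2" s = true then
        total + (PySem.Str.count s "5" : Int)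
      else total
    sweepGo step (i - step) total'
  else total
termination_by (i - 999).toNat
decreasing_by omega

-- Source B's _sweep(hi, m)
def sweep (hi m : Int) : Int :=
  let par := PySem.Int.mod hi 2
  if PySem.Int.mod m 2 = 0 ∧ par = 1 then 0
  else
    let i0 := hi - PySem.Int.mod hi m
    let i := if PySem.Int.mod m 2 = 1 ∧ PySem.Int.mod i0 2 ≠ par then i0 - m else i0
    let step := if PySem.Int.mod m 2 = 0 then m else 2 * m
    sweepGo step i 0

def five_div_seq_alt (n : Int) : Int :=
  let hi := n - 1
  if hi < 1000 then 0
  else sweep hi 9 + sweep hi 14 - sweep hi 126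

-- ===== PRECONDITION & SPEC =====
def Spec_five_div_seq (n : Int) (out : Int) : Prop := out = five_div_seq_alt n
instance (n : Int) (out : Int) : Decidable (Spec_five_div_seq n out) := by unfold Spec_five_div_seq; infer_instance

-- ===== CLAIM (what is proved, stated in full; the proofs are below) =====
def Claim_equal_five_div_seq : Prop := ∀ (n : Int), Dom_five_div_seq n → Spec_five_div_seq n (five_div_seq n)

-- ===== LEMMAS AND PROOFS =====

-- the digit-test contribution of one integer
def pvG (i : Int) : Int :=
  if 4 ≤ (PySem.Set.ofList (PySem.Int.toStr i).toList).length ∧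
      PySem.Str.isIn "2" (PySem.Int.toStr i) = true then
    (PySem.Str.count (PySem.Int.toStr i) "5" : Int)
  else 0

-- A's iteration list
def pvL (a : Int) : List Int := PySem.List.pyRange a 999 (-2)

-- one inclusion-exclusion summand
def pvF (m : Int) (x : Int) : Int := if m ∣ x then pvG x else 0

lemma pvL_nil {a : Int} (h : a ≤ 999) : pvL a = [] := by
  simp only [pvL, PySem.List.pyRange]
  norm_num
  intro h'
  omega

lemma pvL_cons {a : Int} (h : 1000 ≤ a) : pvL a = a :: pvL (a - 2) := by
  simp only [pvL, PySem.List.pyRange]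
  norm_num
  rw [if_pos (by omega : (999:Int) < a)]
  by_cases h2 : (999:Int) < a - 2
  · rw [if_pos h2]
    rw [show ((a - 999 + 2 - 1) / 2).toNat = ((a - 2 - 999 + 2 - 1)/2).toNat + 1 by omega]
    rw [List.range_succ_eq_map]
    simp only [List.map_cons, List.map_map, Nat.cast_zero]
    refine List.cons_eq_cons.mpr ⟨by ring, List.map_congr_left fun k _ => ?_⟩
    simp only [Function.comp_apply]
    push_cast
    ring
  · rw [if_neg h2]
    rw [show ((a - 999 + 2 - 1) / 2).toNat = 1 by omega]
    simp

lemma foldlA_eq (l : List Int) (c : Int) :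
    l.foldl
      (fun count i =>
        let str_i := PySem.Int.toStr i
        if 4 ≤ (PySem.Set.ofList str_i.toList).length ∧ PySem.Str.isIn "2" str_i = true then
          if PySem.Int.mod i 9 = 0 ∨ PySem.Int.mod i 14 = 0 then
            count + (PySem.Str.count str_i "5" : Int)
          else count
        else count) c
    = c + (l.map (fun i => if (9:Int) ∣ i ∨ (14:Int) ∣ i then pvG i else 0)).sum := by
  induction l generalizing c with
  | nil => simp
  | cons x xs ih =>
    simp only [List.foldl_cons, List.map_cons, List.sum_cons, ih]
    simp only [PySem.Int.mod_eq_zero_iff_dvd, pvG]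
    split_ifs <;> ring

lemma pointwise (i : Int) :
    (if (9:Int) ∣ i ∨ (14:Int) ∣ i then pvG i else 0)
      = pvF 9 i + pvF 14 i - pvF 126 i := by
  unfold pvF
  have h126 : ((126:Int) ∣ i) ↔ ((9:Int) ∣ i ∧ (14:Int) ∣ i) := by omega
  by_cases h9 : (9:Int) ∣ i <;> by_cases h14 : (14:Int) ∣ i <;>
    simp [h9, h14, h126]

lemma sum_split (l : List Int) :
    (l.map (fun i => if (9:Int) ∣ i ∨ (14:Int) ∣ i then pvG i else 0)).sum
      = (l.map (pvF 9)).sum + (l.map (pvF 14)).sum - (l.map (pvF 126)).sum := by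
  induction l with
  | nil => simp
  | cons x xs ih => simp only [List.map_cons, List.sum_cons, ih, pointwise x]; ring

-- the sweep loop, started at the largest candidate i ≤ a, sums pvF m over A's list
lemma sweepGo_spec (m : Int) (hm : m = 9 ∨ m = 14 ∨ m = 126)
    (step : Int) (hstep : step = if (2:Int) ∣ m then m else 2 * m) :
    ∀ (k : Nat) (a i total : Int), (a - 999).toNat ≤ k →
      m ∣ i → (2:Int) ∣ (a - i) → i ≤ a → a - i < step →
      sweepGo step i total = total + ((pvL a).map (pvF m)).sum := by
  have hstep2 : 2 ≤ step ∧ step ≤ 252 := by rcases hm with h|h|h <;> subst h <;> simp at hstep <;> omega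
  intro k
  induction k with
  | zero =>
    intro a i total hk hdvd hpar hle hlt
    rw [pvL_nil (by omega), sweepGo]
    simp only [List.map_nil, List.sum_nil, add_zero]
    rw [dif_neg (by omega)]
  | succ k ih =>
    intro a i total hk hdvd hpar hle hlt
    by_cases ha : a ≤ 999
    · rw [pvL_nil ha, sweepGo]
      simp only [List.map_nil, List.sum_nil, add_zero]
      rw [dif_neg (by omega)]
    · rw [pvL_cons (by omega)]
      by_cases hma : m ∣ a
      · -- a itself is the top candidate, so i = a and the loop counts it
        have hia : i = a := by
          rcases hm with h|h|h <;> subst h <;> simp at hstep <;> omega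
        subst hia
        rw [sweepGo, dif_pos ⟨by omega, by omega⟩]
        simp only [List.map_cons, List.sum_cons]
        have hfa : pvF m i = pvG i := by simp [pvF, hma]
        rw [ih (i - 2) (i - step) _ (by omega) (by rcases hm with h|h|h <;> subst h <;> simp at hstep <;> omega) (by omega) (by omega) (by omega)]
        simp only [pvG, hfa]
        split_ifs <;> ring
      · -- a is not a multiple of m: it contributes 0 and the loop ignores it
        have hne : i ≠ a := fun h => hma (h ▸ hdvd)
        have hfa : pvF m a = 0 := by simp [pvF, hma]
        simp only [List.map_cons, List.sum_cons, hfa, zero_add]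
        exact ih (a - 2) i total (by omega) hdvd (by omega) (by omega) (by omega)

-- when m is even and the range holds only odd numbers, the inclusion-exclusion term is 0
lemma sum_vanish (m : Int) (h2 : (2:Int) ∣ m) :
    ∀ (k : Nat) (a : Int), (a - 999).toNat ≤ k → ¬ (2:Int) ∣ a →
      ((pvL a).map (pvF m)).sum = 0 := by
  intro k
  induction k with
  | zero => intro a hk hodd; rw [pvL_nil (by omega)]; simp
  | succ k ih =>
    intro a hk hodd
    by_cases ha : a ≤ 999
    · rw [pvL_nil ha]; simp
    · rw [pvL_cons (by omega)]
      have hfa : pvF m a = 0 := by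
        simp only [pvF, if_neg (fun hma => hodd (dvd_trans h2 hma))]
      simp only [List.map_cons, List.sum_cons, hfa, zero_add]
      exact ih (a - 2) (by omega) (by omega)

lemma sweep_spec (m : Int) (hm : m = 9 ∨ m = 14 ∨ m = 126) (hi : Int) (_hhi : 1000 ≤ hi) :
    sweep hi m = ((pvL hi).map (pvF m)).sum := by
  have e2 : ∀ x : Int, PySem.Int.mod x 2 = x % 2 := fun x => PySem.Int.mod_eq_emod_of_pos (by omega)
  rcases hm with h|h|h <;> subst h
  · -- m = 9 (odd): start at the top multiple of 9 with hi's parity, step 18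
    unfold sweep
    have e9 : PySem.Int.mod hi 9 = hi % 9 := PySem.Int.mod_eq_emod_of_pos (by omega)
    simp only [e2, e9]
    norm_num
    split_ifs with hc
    · rw [sweepGo_spec 9 (Or.inl rfl) 18 (by norm_num) (hi - 999).toNat hi
          (hi - hi % 9) 0 (by omega) (by omega) (by omega) (by omega) (by omega)]
      ring
    · rw [sweepGo_spec 9 (Or.inl rfl) 18 (by norm_num) (hi - 999).toNat hi
          (hi - hi % 9 - 9) 0 (by omega) (by omega) (by omega) (by omega) (by omega)]
      ring
  · -- m = 14 (even): empty when hi is odd, else step 14 from hi - hi % 14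
    unfold sweep
    have e14 : PySem.Int.mod hi 14 = hi % 14 := PySem.Int.mod_eq_emod_of_pos (by omega)
    simp only [e2, e14]
    norm_num
    by_cases hodd : hi % 2 = 1
    · rw [if_pos hodd, (sum_vanish 14 (by norm_num) (hi - 999).toNat hi (by omega) (by omega)).symm]
    · rw [if_neg hodd]
      rw [sweepGo_spec 14 (Or.inr (Or.inl rfl)) 14 (by norm_num) (hi - 999).toNat hi
          (hi - hi % 14) 0 (by omega) (by omega) (by omega) (by omega) (by omega)]
      ring
  · -- m = 126 (even): empty when hi is odd, else step 126 from hi - hi % 126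
    unfold sweep
    have e126 : PySem.Int.mod hi 126 = hi % 126 := PySem.Int.mod_eq_emod_of_pos (by omega)
    simp only [e2, e126]
    norm_num
    by_cases hodd : hi % 2 = 1
    · rw [if_pos hodd, (sum_vanish 126 (by norm_num) (hi - 999).toNat hi (by omega) (by omega)).symm]
    · rw [if_neg hodd]
      rw [sweepGo_spec 126 (Or.inr (Or.inr rfl)) 126 (by norm_num) (hi - 999).toNat hi
          (hi - hi % 126) 0 (by omega) (by omega) (by omega) (by omega) (by omega)]
      ring

-- ===== VERDICT (by name: the statement is the Claim_ definition above) =====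
theorem five_div_seq_spec : Claim_equal_five_div_seq := by
  intro n _
  unfold Spec_five_div_seq five_div_seq five_div_seq_alt
  by_cases h : n - 1 < 1000
  · rw [show PySem.List.pyRange (n-1) 999 (-2) = pvL (n-1) from rfl, pvL_nil (by omega)]
    simp [h]
  · rw [show PySem.List.pyRange (n-1) 999 (-2) = pvL (n-1) from rfl, foldlA_eq, sum_split]
    simp only [h]
    rw [sweep_spec 9 (by omega) (n-1) (by omega),
        sweep_spec 14 (by omega) (n-1) (by omega),
        sweep_spec 126 (by omega) (n-1) (by omega)]
    simp
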